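-- pv_equiv track=rewrite | github.com/MaCoredroid/Lumo_FlyWheel | verifier_data/runbook-code-reconciliation/_shared/contract_checks.py | _is_ignored_runtime_file
-- ===== SOURCE A (Python) =====
-- IGNORED_RUNTIME_PREFIXES = (
--     ".pytest_cache/",
--     "__pycache__/",
-- )
--
-- IGNORED_RUNTIME_SUFFIXES = (
--     ".pyc",
--     ".pyo",
-- )
--
-- IGNORED_RUNTIME_FILES = {
--     ".DS_Store",
-- }
--
-- def _is_ignored_runtime_file(rel: str) -> bool:
--     if rel in IGNORED_RUNTIME_FILES:
--         return True
--     if "/__pycache__/" in f"/{rel}/" or rel.startswith("__pycache__/"):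
--         return True
--     if "/.pytest_cache/" in f"/{rel}/" or rel.startswith(".pytest_cache/"):
--         return True
--     if any(rel.startswith(prefix) for prefix in IGNORED_RUNTIME_PREFIXES):
--         return True
--     return rel.endswith(IGNORED_RUNTIME_SUFFIXES)
-- ===== SOURCE B (Python) =====
-- IGNORED_DIR_NAMES = {"__pycache__", ".pytest_cache"}
--
-- def _is_ignored_runtime_file(rel: str) -> bool:
--     if rel == ".DS_Store":
--         return True
--     if any(part in IGNORED_DIR_NAMES for part in rel.split("/")):
--         return True
--     return rel.endswith((".pyc", ".pyo"))
-- ===== Notes on version B (the rewrite author's own statement) =====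
-- stated objective: idiomatic
-- what changed: B splits rel into '/'-components once and tests them against a set of ignored directory names, replacing A's substring-in-fenced-string tests and its redundant startswith prefix loop.
import Mathlib
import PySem

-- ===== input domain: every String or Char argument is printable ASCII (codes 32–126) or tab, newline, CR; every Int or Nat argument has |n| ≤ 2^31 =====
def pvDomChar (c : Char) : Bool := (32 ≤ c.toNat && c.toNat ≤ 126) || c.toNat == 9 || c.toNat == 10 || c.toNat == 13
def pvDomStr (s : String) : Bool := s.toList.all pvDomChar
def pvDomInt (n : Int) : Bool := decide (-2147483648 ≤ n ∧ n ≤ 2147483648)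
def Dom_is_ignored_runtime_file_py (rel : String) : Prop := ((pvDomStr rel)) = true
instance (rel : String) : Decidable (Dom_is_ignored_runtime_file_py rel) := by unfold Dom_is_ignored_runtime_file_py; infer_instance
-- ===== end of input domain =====

-- B replaces A's substring-in-fenced-string tests and redundant startswith loop by one
-- split of rel into '/'-components checked against a set of ignored directory names (idiomatic).

-- ===== PORT A =====
def pvIgnoredRuntimePrefixes : List String := [".pytest_cache/", "__pycache__/"]
def pvIgnoredRuntimeSuffixes : List String := [".pyc", ".pyo"]
def pvIgnoredRuntimeFiles : PySem.Set String := PySem.Set.ofList [".DS_Store"]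

def is_ignored_runtime_file_py (rel : String) : Bool :=
  if PySem.Set.contains pvIgnoredRuntimeFiles rel then true
  else if PySem.Str.isIn "/__pycache__/" ("/" ++ rel ++ "/") || PySem.Str.startswith rel "__pycache__/" then true
  else if PySem.Str.isIn "/.pytest_cache/" ("/" ++ rel ++ "/") || PySem.Str.startswith rel ".pytest_cache/" then true
  else if pvIgnoredRuntimePrefixes.any (fun prefix_ => PySem.Str.startswith rel prefix_) then true
  else pvIgnoredRuntimeSuffixes.any (fun suf => PySem.Str.endswith rel suf)

-- ===== PORT B =====
def pvIgnoredDirNames : PySem.Set (List Char) :=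
  PySem.Set.ofList ["__pycache__".toList, ".pytest_cache".toList]

def is_ignored_runtime_file_py_alt (rel : String) : Bool :=
  if rel == ".DS_Store" then true
  else if (List.splitOn '/' rel.toList).any (fun part => PySem.Set.contains pvIgnoredDirNames part) then true
  else [".pyc", ".pyo"].any (fun suf => PySem.Str.endswith rel suf)

-- ===== PRECONDITION & SPEC =====
def Spec_is_ignored_runtime_file_py (rel : String) (out : Bool) : Prop := out = is_ignored_runtime_file_py_alt rel
instance (rel : String) (out : Bool) : Decidable (Spec_is_ignored_runtime_file_py rel out) := by unfold Spec_is_ignored_runtime_file_py; infer_instance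

-- ===== CLAIM (what is proved, stated in full; the proofs are below) =====
def Claim_equal_is_ignored_runtime_file_py : Prop := ∀ (rel : String), Dom_is_ignored_runtime_file_py rel → Spec_is_ignored_runtime_file_py rel (is_ignored_runtime_file_py rel)

-- ===== LEMMAS AND PROOFS =====

-- two '/'-free blocks closed by the same first '/' are equal
lemma pv_free_eq (a : List Char) : ∀ (X t q : List Char), '/' ∉ a → '/' ∉ X →
    a ++ '/' :: t = X ++ '/' :: q → X = a := by
  induction a with
  | nil =>
    intro X t q _ hX h
    cases X with
    | nil => rfl
    | cons x X' =>
      simp only [List.nil_append, List.cons_append, List.cons.injEq] at h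
      exact absurd (h.1 ▸ List.mem_cons_self) hX
  | cons e a' ih =>
    intro X t q ha hX h
    cases X with
    | nil =>
      simp only [List.cons_append, List.nil_append, List.cons.injEq] at h
      exact absurd (h.1.symm ▸ List.mem_cons_self) ha
    | cons x X' =>
      simp only [List.cons_append, List.cons.injEq] at h
      obtain ⟨he, h2⟩ := h
      have hx : X' = a' :=
        ih X' t q (fun hm => ha (List.mem_cons_of_mem _ hm))
          (fun hm => hX (List.mem_cons_of_mem _ hm)) h2
      rw [hx, he]

-- an occurrence of '/'::X++['/'] cannot start inside a '/'-free block
lemma pv_no_start (X : List Char) : ∀ (a t : List Char), '/' ∉ a →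
    ('/' :: X ++ ['/']) <:+: a ++ '/' :: t → ('/' :: X ++ ['/']) <:+: '/' :: t := by
  intro a
  induction a with
  | nil => intro t _ h; simpa using h
  | cons e a' ih =>
    intro t ha h
    obtain ⟨p, q, hpq⟩ := h
    cases p with
    | nil =>
      simp only [List.nil_append, List.cons_append, List.cons.injEq] at hpq
      exact absurd (hpq.1 ▸ List.mem_cons_self) ha
    | cons f p' =>
      simp only [List.cons_append, List.cons.injEq] at hpq
      exact ih t (fun hm => ha (List.mem_cons_of_mem _ hm)) ⟨p', q, by simpa using hpq.2⟩

-- fence decomposition: an occurrence either matches the first component or lies in the rest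
lemma pv_fence (X : List Char) (hX : '/' ∉ X) (a t : List Char) (ha : '/' ∉ a) :
    ('/' :: X ++ ['/']) <:+: ('/' :: a) ++ '/' :: t ↔
      (X = a ∨ ('/' :: X ++ ['/']) <:+: '/' :: t) := by
  constructor
  · rintro ⟨p, q, hpq⟩
    cases p with
    | nil =>
      left
      simp only [List.nil_append, List.cons_append, List.cons.injEq, List.append_assoc] at hpq
      exact pv_free_eq a X t q ha hX (by simpa using hpq.2.symm)
    | cons d p' =>
      right
      simp only [List.cons_append, List.cons.injEq] at hpq
      exact pv_no_start X a t ha ⟨p', q, by simpa using hpq.2⟩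
  · rintro (rfl | h)
    · exact ⟨[], t, by simp⟩
    · exact h.trans (List.suffix_append ('/' :: a) ('/' :: t)).isInfix

-- the fenced-substring test is membership of the component list (split kept generalized by
-- the pending first-component prefix a)
lemma pv_mem_split (X : List Char) (hX : '/' ∉ X) :
    ∀ (cs : List Char), ∀ (a : List Char), '/' ∉ a →
      (('/' :: X ++ ['/']) <:+: ('/' :: a) ++ cs ++ ['/'] ↔
        X ∈ List.modifyHead (a ++ ·) (cs.splitOnP (· == '/'))) := by
  intro cs
  induction cs with
  | nil =>
    intro a ha
    have h1 : ('/' :: a) ++ ([] : List Char) ++ ['/'] = ('/' :: a) ++ '/' :: [] := by simp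
    rw [h1, pv_fence X hX a [] ha]
    constructor
    · rintro (rfl | h)
      · simp [List.splitOnP_nil]
      · exfalso
        have := h.length_le
        simp at this
    · intro h
      simp [List.splitOnP_nil] at h
      exact Or.inl h
  | cons c cs' ih =>
    intro a ha
    have hmid : List.modifyHead (fun x => ([] : List Char) ++ x) (cs'.splitOnP (· == '/')) =
        cs'.splitOnP (· == '/') := by
      cases cs'.splitOnP (· == '/') <;> simp
    by_cases hc : c = '/'
    · subst hc
      have h1 : ('/' :: a) ++ ('/' :: cs') ++ ['/'] = ('/' :: a) ++ '/' :: (cs' ++ ['/']) := by simp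
      have h2 : ('/' :: ([] : List Char)) ++ cs' ++ ['/'] = '/' :: (cs' ++ ['/']) := by simp
      rw [h1, pv_fence X hX a _ ha, ← h2, ih [] (by simp), hmid, List.splitOnP_cons]
      simp only [beq_self_eq_true, if_pos, List.modifyHead_cons, List.append_nil, List.mem_cons]
    · have h1 : ('/' :: a) ++ (c :: cs') ++ ['/'] = ('/' :: (a ++ [c])) ++ cs' ++ ['/'] := by simp
      have ha' : '/' ∉ a ++ [c] := by
        intro hm
        rcases List.mem_append.mp hm with hm | hm
        · exact ha hm
        · exact hc (List.mem_singleton.mp hm).symm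
      rw [h1, ih (a ++ [c]) ha', List.splitOnP_cons]
      simp only [beq_iff_eq, hc, if_false]
      have he : List.modifyHead (fun x => a ++ x)
            (List.modifyHead (fun x => c :: x) (cs'.splitOnP (· == '/'))) =
          List.modifyHead (fun x => (a ++ [c]) ++ x) (cs'.splitOnP (· == '/')) := by
        rw [List.modifyHead_modifyHead]
        congr 1
        funext x
        simp
      rw [he]

-- clean form: fenced substring test = component membership
lemma pv_isIn_eq (X : List Char) (hX : '/' ∉ X) (cs : List Char) :
    PySem.Chars.isIn ('/' :: X ++ ['/']) ('/' :: cs ++ ['/']) =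
      decide (X ∈ List.splitOn '/' cs) := by
  have h0 : ('/' :: ([] : List Char)) ++ cs ++ ['/'] = '/' :: cs ++ ['/'] := by simp
  have hsp : List.splitOn '/' cs = cs.splitOnP (· == '/') := rfl
  have hm : List.modifyHead (fun x => ([] : List Char) ++ x) (cs.splitOnP (· == '/')) =
      cs.splitOnP (· == '/') := by
    cases cs.splitOnP (· == '/') <;> simp
  rcases Bool.eq_false_or_eq_true (PySem.Chars.isIn ('/' :: X ++ ['/']) ('/' :: cs ++ ['/'])) with h | h
  · rw [h]
    have := (PySem.Chars.isIn_iff_infix _ _).mp h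
    rw [← h0] at this
    have hmem := (pv_mem_split X hX cs [] (by simp)).mp this
    rw [hm] at hmem
    rw [← hsp] at hmem
    simp [hmem]
  · rw [h]
    have := (PySem.Chars.isIn_eq_false_iff _ _).mp h
    rw [← h0] at this
    have hnot : X ∉ List.splitOn '/' cs := by
      intro hmem
      exact this ((pv_mem_split X hX cs [] (by simp)).mpr (by rw [hm, ← hsp]; exact hmem))
    simp [hnot]

-- a startswith test with a prefix ending in '/' is absorbed by the fenced substring test
lemma pv_start_imp (X cs : List Char) (h : PySem.Chars.startswith cs (X ++ ['/']) = true) :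
    PySem.Chars.isIn ('/' :: X ++ ['/']) ('/' :: cs ++ ['/']) = true := by
  rw [PySem.Chars.isIn_iff_infix]
  obtain ⟨r, hr⟩ := (PySem.Chars.startswith_iff cs (X ++ ['/'])).mp h
  exact ⟨[], r ++ ['/'], by simp [← hr]⟩

-- A's "fenced substring or startswith" pair for one directory name is exactly B's membership test
lemma pv_test_eq (X : List Char) (hX : '/' ∉ X) (cs : List Char) :
    (PySem.Chars.isIn ('/' :: X ++ ['/']) ('/' :: cs ++ ['/']) ||
        PySem.Chars.startswith cs (X ++ ['/'])) =
      decide (X ∈ List.splitOn '/' cs) := by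
  rcases Bool.eq_false_or_eq_true (PySem.Chars.startswith cs (X ++ ['/'])) with hs | hs
  · rw [hs, Bool.or_true, ← pv_isIn_eq X hX cs]
    exact (pv_start_imp X cs hs).symm
  · rw [hs, Bool.or_false, pv_isIn_eq X hX cs]

-- ===== VERDICT (by name: the statement is the Claim_ definition above) =====
theorem is_ignored_runtime_file_py_spec : Claim_equal_is_ignored_runtime_file_py := by
  intro rel _
  unfold Spec_is_ignored_runtime_file_py is_ignored_runtime_file_py is_ignored_runtime_file_py_alt
  have hfence : ("/" ++ rel ++ "/").toList = '/' :: rel.toList ++ ['/'] := by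
    simp [String.toList_append]
  have hfreepy : '/' ∉ "__pycache__".toList := by decide
  have hfreept : '/' ∉ ".pytest_cache".toList := by decide
  have hds : PySem.Set.contains pvIgnoredRuntimeFiles rel = (rel == ".DS_Store") := by
    by_cases h : rel = ".DS_Store" <;>
      simp [pvIgnoredRuntimeFiles, PySem.Set.contains, PySem.Set.ofList, h]
  have hA1 : (PySem.Str.isIn "/__pycache__/" ("/" ++ rel ++ "/") ||
      PySem.Str.startswith rel "__pycache__/") =
      decide ("__pycache__".toList ∈ List.splitOn '/' rel.toList) := by
    rw [show PySem.Str.isIn "/__pycache__/" ("/" ++ rel ++ "/") =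
        PySem.Chars.isIn ("/__pycache__/" : String).toList (("/" ++ rel ++ "/")).toList from rfl,
      hfence,
      show ("/__pycache__/" : String).toList = '/' :: "__pycache__".toList ++ ['/'] from rfl,
      show PySem.Str.startswith rel "__pycache__/" =
        PySem.Chars.startswith rel.toList ("__pycache__".toList ++ ['/']) from rfl]
    exact pv_test_eq _ hfreepy rel.toList
  have hA2 : (PySem.Str.isIn "/.pytest_cache/" ("/" ++ rel ++ "/") ||
      PySem.Str.startswith rel ".pytest_cache/") =
      decide (".pytest_cache".toList ∈ List.splitOn '/' rel.toList) := by
    rw [show PySem.Str.isIn "/.pytest_cache/" ("/" ++ rel ++ "/") =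
        PySem.Chars.isIn ("/.pytest_cache/" : String).toList (("/" ++ rel ++ "/")).toList from rfl,
      hfence,
      show ("/.pytest_cache/" : String).toList = '/' :: ".pytest_cache".toList ++ ['/'] from rfl,
      show PySem.Str.startswith rel ".pytest_cache/" =
        PySem.Chars.startswith rel.toList (".pytest_cache".toList ++ ['/']) from rfl]
    exact pv_test_eq _ hfreept rel.toList
  have hB : (List.splitOn '/' rel.toList).any
      (fun part => PySem.Set.contains pvIgnoredDirNames part) =
      (decide ("__pycache__".toList ∈ List.splitOn '/' rel.toList) ||
        decide (".pytest_cache".toList ∈ List.splitOn '/' rel.toList)) := by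
    by_cases hp : "__pycache__".toList ∈ List.splitOn '/' rel.toList
    · rw [decide_eq_true hp, Bool.true_or]
      exact List.any_eq_true.mpr ⟨_, hp, by decide⟩
    · by_cases ht : ".pytest_cache".toList ∈ List.splitOn '/' rel.toList
      · rw [decide_eq_false hp, decide_eq_true ht, Bool.false_or]
        exact List.any_eq_true.mpr ⟨_, ht, by decide⟩
      · rw [decide_eq_false hp, decide_eq_false ht, Bool.or_false, Bool.eq_false_iff]
        intro h
        obtain ⟨part, hmem, hc⟩ := List.any_eq_true.mp h
        have : part = "__pycache__".toList ∨ part = ".pytest_cache".toList := by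
          simpa [pvIgnoredDirNames, PySem.Set.contains, PySem.Set.ofList, PySem.Set.add,
            PySem.Set.empty] using hc
        rcases this with rfl | rfl
        · exact hp hmem
        · exact ht hmem
  rw [hds, hA1, hA2, hB]
  by_cases h1 : (rel == ".DS_Store") = true
  · simp [h1]
  · rw [Bool.not_eq_true] at h1
    rw [h1]
    by_cases hp : "__pycache__".toList ∈ List.splitOn '/' rel.toList
    · rw [decide_eq_true hp]
      simp
    · rw [decide_eq_false hp]
      by_cases ht : ".pytest_cache".toList ∈ List.splitOn '/' rel.toList
      · rw [decide_eq_true ht]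
        simp
      · rw [decide_eq_false ht]
        have hs1 : PySem.Str.startswith rel "__pycache__/" = false := by
          rcases Bool.eq_false_or_eq_true (PySem.Str.startswith rel "__pycache__/") with h | h
          · rw [h, Bool.or_true, decide_eq_false hp] at hA1
            exact absurd hA1 (by simp)
          · exact h
        have hs2 : PySem.Str.startswith rel ".pytest_cache/" = false := by
          rcases Bool.eq_false_or_eq_true (PySem.Str.startswith rel ".pytest_cache/") with h | h
          · rw [h, Bool.or_true, decide_eq_false ht] at hA2
            exact absurd hA2 (by simp)
          · exact h
        have hpref : pvIgnoredRuntimePrefixes.any (fun p => PySem.Str.startswith rel p) = false := by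
          simp only [pvIgnoredRuntimePrefixes, List.any_cons, List.any_nil, hs1, hs2,
            Bool.or_false]
        rw [hpref]
        simp [pvIgnoredRuntimeSuffixes]
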